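-- pv_equiv track=rewrite | github.com/nik2401/AI-Powered-ATS-Resume-Analyzer | src/professional_ats_engine.py | _skills_are_similar
-- ===== SOURCE A (Python) =====
-- def _skills_are_similar(skill1: str, skill2: str) -> bool:
--     """Check if two skills are conceptually similar"""
--     similar_groups = [
--         {'python', 'py', 'python programming'},
--         {'javascript', 'js', 'node.js', 'nodejs'},
--         {'sql', 'mysql', 'postgresql', 'database'},
--         {'machine learning', 'ml', 'artificial intelligence', 'ai'},
--         {'data analysis', 'analytics', 'data science'},
--     ]
--
--     for group in similar_groups:
--         if skill1 in group and skill2 in group: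
--             return True
--     return False
-- ===== SOURCE B (Python) =====
-- def _skills_are_similar(skill1: str, skill2: str) -> bool:
--     """Check if two skills are conceptually similar (reverse-index formulation)."""
--     similar_groups = [
--         ['python', 'py', 'python programming'],
--         ['javascript', 'js', 'node.js', 'nodejs'],
--         ['sql', 'mysql', 'postgresql', 'database'],
--         ['machine learning', 'ml', 'artificial intelligence', 'ai'],
--         ['data analysis', 'analytics', 'data science'],
--     ]
--     index = {}
--     for i, group in enumerate(similar_groups):
--         for s in group:
--             index[s] = i
--     if skill1 in index and skill2 in index:
--         return index[skill1] == index[skill2]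
--     return False
-- ===== Notes on version B (the rewrite author's own statement) =====
-- stated objective: idiomatic
-- what changed: B builds a reverse index (skill -> group id) once and answers by comparing the two looked-up group ids, instead of A's scan over the groups testing joint membership in each.
import Mathlib
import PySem

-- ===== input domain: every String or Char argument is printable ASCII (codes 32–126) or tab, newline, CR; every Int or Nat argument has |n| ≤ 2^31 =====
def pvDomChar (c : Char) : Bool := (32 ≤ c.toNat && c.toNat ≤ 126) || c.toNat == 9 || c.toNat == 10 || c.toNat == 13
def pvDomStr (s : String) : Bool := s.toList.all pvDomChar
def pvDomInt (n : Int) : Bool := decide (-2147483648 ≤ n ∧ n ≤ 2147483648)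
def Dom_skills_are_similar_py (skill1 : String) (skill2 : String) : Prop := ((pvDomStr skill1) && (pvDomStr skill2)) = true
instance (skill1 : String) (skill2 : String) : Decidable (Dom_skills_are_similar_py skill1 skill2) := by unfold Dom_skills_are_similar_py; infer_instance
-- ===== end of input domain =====

-- B replaces A's per-query scan over the groups by a reverse index (skill -> group id) built once,
-- answering by comparing the two looked-up group ids (objective: idiomatic).

-- ===== PORT A =====
-- the five similarity groups, as Python sets (membership only; literal element order)
def pvGroupsA : List (PySem.Set String) :=
  [ PySem.Set.ofList ["python", "py", "python programming"],
    PySem.Set.ofList ["javascript", "js", "node.js", "nodejs"],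
    PySem.Set.ofList ["sql", "mysql", "postgresql", "database"],
    PySem.Set.ofList ["machine learning", "ml", "artificial intelligence", "ai"],
    PySem.Set.ofList ["data analysis", "analytics", "data science"] ]

-- 'for group in similar_groups: if skill1 in group and skill2 in group: return True / return False'
def pvLoopA (skill1 skill2 : String) : List (PySem.Set String) → Bool
  | [] => false
  | g :: rest =>
      if PySem.Set.contains g skill1 && PySem.Set.contains g skill2 then true
      else pvLoopA skill1 skill2 rest

def skills_are_similar_py (skill1 : String) (skill2 : String) : Bool :=
  pvLoopA skill1 skill2 pvGroupsA

-- ===== PORT B =====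
def pvGroupsB : List (List String) :=
  [ ["python", "py", "python programming"],
    ["javascript", "js", "node.js", "nodejs"],
    ["sql", "mysql", "postgresql", "database"],
    ["machine learning", "ml", "artificial intelligence", "ai"],
    ["data analysis", "analytics", "data science"] ]

-- 'for i, group in enumerate(...): for s in group: index[s] = i'
def pvIndexB : PySem.Dict String Int :=
  (PySem.List.enumerate pvGroupsB).foldl
    (fun d ig => ig.2.foldl (fun d s => d.insert s ig.1) d)
    PySem.Dict.empty

def skills_are_similar_py_alt (skill1 : String) (skill2 : String) : Bool :=
  let index := pvIndexB
  if index.contains skill1 && index.contains skill2 then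
    -- index[skill1] == index[skill2]; both lookups are guarded by 'contains', so getD's default is unreachable
    (index.get? skill1).getD 0 == (index.get? skill2).getD 0
  else false

-- ===== PRECONDITION & SPEC =====
def Spec_skills_are_similar_py (skill1 : String) (skill2 : String) (out : Bool) : Prop := out = skills_are_similar_py_alt skill1 skill2
instance (skill1 : String) (skill2 : String) (out : Bool) : Decidable (Spec_skills_are_similar_py skill1 skill2 out) := by unfold Spec_skills_are_similar_py; infer_instance

-- ===== CLAIM (what is proved, stated in full; the proofs are below) =====
def Claim_equal_skills_are_similar_py : Prop := ∀ (skill1 : String) (skill2 : String), Dom_skills_are_similar_py skill1 skill2 → Spec_skills_are_similar_py skill1 skill2 (skills_are_similar_py skill1 skill2)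

-- ===== LEMMAS AND PROOFS =====

-- all skills occurring in any group
def pvAllSkills : List String :=
  ["python", "py", "python programming", "javascript", "js", "node.js", "nodejs",
   "sql", "mysql", "postgresql", "database",
   "machine learning", "ml", "artificial intelligence", "ai",
   "data analysis", "analytics", "data science"]

theorem pvA_notmem_left (s1 s2 : String) (h : s1 ∉ pvAllSkills) :
    skills_are_similar_py s1 s2 = false := by
  simp only [pvAllSkills, List.mem_cons, List.not_mem_nil, or_false, not_or] at h
  obtain ⟨h1, h2, h3, h4, h5, h6, h7, h8, h9, h10, h11, h12, h13, h14, h15, h16, h17, h18⟩ := h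
  simp [skills_are_similar_py, pvLoopA, pvGroupsA, PySem.Set.contains, PySem.Set.ofList,
        PySem.Set.add, h1, h2, h3, h4, h5, h6, h7, h8, h9, h10, h11, h12, h13, h14, h15, h16, h17, h18]

theorem pvA_notmem_right (s1 s2 : String) (h : s2 ∉ pvAllSkills) :
    skills_are_similar_py s1 s2 = false := by
  simp only [pvAllSkills, List.mem_cons, List.not_mem_nil, or_false, not_or] at h
  obtain ⟨h1, h2, h3, h4, h5, h6, h7, h8, h9, h10, h11, h12, h13, h14, h15, h16, h17, h18⟩ := h
  simp [skills_are_similar_py, pvLoopA, pvGroupsA, PySem.Set.contains, PySem.Set.ofList,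
        PySem.Set.add, h1, h2, h3, h4, h5, h6, h7, h8, h9, h10, h11, h12, h13, h14, h15, h16, h17, h18]

-- the reverse index, evaluated once to its literal association list
theorem pvIndexB_eq : pvIndexB = PySem.Dict.mk
    [("python", 0), ("py", 0), ("python programming", 0),
     ("javascript", 1), ("js", 1), ("node.js", 1), ("nodejs", 1),
     ("sql", 2), ("mysql", 2), ("postgresql", 2), ("database", 2),
     ("machine learning", 3), ("ml", 3), ("artificial intelligence", 3), ("ai", 3),
     ("data analysis", 4), ("analytics", 4), ("data science", 4)] := by decide

theorem pvB_contains_false (s : String) (h : s ∉ pvAllSkills) :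
    pvIndexB.contains s = false := by
  simp only [pvAllSkills, List.mem_cons, List.not_mem_nil, or_false, not_or] at h
  obtain ⟨h1, h2, h3, h4, h5, h6, h7, h8, h9, h10, h11, h12, h13, h14, h15, h16, h17, h18⟩ := h
  simp only [pvIndexB_eq, PySem.Dict.contains_mk]
  simp
  exact ⟨fun e => h1 e.symm, fun e => h2 e.symm, fun e => h3 e.symm, fun e => h4 e.symm,
         fun e => h5 e.symm, fun e => h6 e.symm, fun e => h7 e.symm, fun e => h8 e.symm,
         fun e => h9 e.symm, fun e => h10 e.symm, fun e => h11 e.symm, fun e => h12 e.symm,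
         fun e => h13 e.symm, fun e => h14 e.symm, fun e => h15 e.symm, fun e => h16 e.symm,
         fun e => h17 e.symm, fun e => h18 e.symm⟩

theorem pvB_notmem_left (s1 s2 : String) (h : s1 ∉ pvAllSkills) :
    skills_are_similar_py_alt s1 s2 = false := by
  unfold skills_are_similar_py_alt
  simp [pvB_contains_false s1 h]

theorem pvB_notmem_right (s1 s2 : String) (h : s2 ∉ pvAllSkills) :
    skills_are_similar_py_alt s1 s2 = false := by
  unfold skills_are_similar_py_alt
  simp [pvB_contains_false s2 h]

theorem pv_eq (s1 s2 : String) : skills_are_similar_py s1 s2 = skills_are_similar_py_alt s1 s2 := by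
  by_cases h1 : s1 ∈ pvAllSkills
  · by_cases h2 : s2 ∈ pvAllSkills
    · simp only [pvAllSkills, List.mem_cons, List.not_mem_nil, or_false] at h1 h2
      rcases h1 with h1|h1|h1|h1|h1|h1|h1|h1|h1|h1|h1|h1|h1|h1|h1|h1|h1|h1 <;> subst h1 <;>
        (rcases h2 with h2|h2|h2|h2|h2|h2|h2|h2|h2|h2|h2|h2|h2|h2|h2|h2|h2|h2 <;> subst h2 <;> decide)
    · rw [pvA_notmem_right s1 s2 h2, pvB_notmem_right s1 s2 h2]
  · rw [pvA_notmem_left s1 s2 h1, pvB_notmem_left s1 s2 h1]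

-- ===== VERDICT (by name: the statement is the Claim_ definition above) =====
theorem skills_are_similar_py_spec : Claim_equal_skills_are_similar_py := by
  intro s1 s2 _
  exact pv_eq s1 s2
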